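-- pv_equiv track=rewrite | github.com/leeinae/algorithm-python | Programmers/80612.py | solution
-- ===== SOURCE A (Python) =====
-- import heapq
--
-- def solution(scoville, K):
--     answer = 0
--     heapq.heapify(scoville)
--
--     while scoville:
--         first = heapq.heappop(scoville)
--         if first >= K: break
--
--         if len(scoville) > 0:
--             answer += 1
--             second = heapq.heappop(scoville)
--             heapq.heappush(scoville, first + (second * 2))
--     else:
--         return -1
--
--     return answer
-- ===== SOURCE B (Python) =====
-- def solution(scoville, K):
--     # Sorted-list version: sort once, always take the two front elements,
--     # re-insert the mix at its sorted position. (Mutates scoville, like A.)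
--     scoville.sort()
--     count = 0
--     while scoville:
--         first = scoville.pop(0)
--         if first >= K:
--             return count
--         if not scoville:
--             return -1
--         second = scoville.pop(0)
--         v = first + 2 * second
--         i = 0
--         while i < len(scoville) and scoville[i] < v:
--             i += 1
--         scoville.insert(i, v)
--         count += 1
--     return -1
-- ===== Notes on version B (the rewrite author's own statement) =====
-- stated objective: simpler
-- what changed: Replaces the binary heap with one in-place sort followed by popping the two front elements and re-inserting the mixed value at its sorted position found by a scan.
import Mathlib
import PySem

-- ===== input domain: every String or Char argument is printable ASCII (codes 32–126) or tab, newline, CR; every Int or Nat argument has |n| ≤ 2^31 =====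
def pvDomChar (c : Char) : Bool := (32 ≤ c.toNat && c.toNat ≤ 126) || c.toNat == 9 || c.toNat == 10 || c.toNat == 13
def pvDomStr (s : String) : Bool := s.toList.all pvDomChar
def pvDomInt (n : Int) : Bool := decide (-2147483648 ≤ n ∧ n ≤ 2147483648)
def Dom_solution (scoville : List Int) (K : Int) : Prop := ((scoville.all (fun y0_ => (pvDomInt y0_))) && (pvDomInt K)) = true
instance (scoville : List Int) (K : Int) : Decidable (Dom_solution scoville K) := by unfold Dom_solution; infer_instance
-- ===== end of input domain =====

-- B replaces A's binary heap by one in-place sort plus front pops and a sorted re-insertion;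
-- both mutate the scoville argument (differently): the equivalence proved is about the RETURN value only.


-- ===== PORT A =====
-- heapq has no PySem primitive; it is ported by its contract (exact for the returned value, which is
-- all A reads): the heap state is the multiset of elements, heapify is the identity on that multiset,
-- heappop removes and returns the smallest element, heappush appends.
def solutionGoA (K : Int) (l : List Int) (answer : Int) : Int :=
  match h : PySem.List.min? l (fun x => x) with
  | none => -1                        -- while exhausted without break: the else branch
  | some first =>
    -- heappop removed the minimum: the remaining heap is l.erase first
    if first ≥ K then answer          -- break; return answer
    else
      match h2 : PySem.List.min? (l.erase first) (fun x => x) with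
      | none => -1                    -- len(scoville) == 0: next while test fails, else branch
      | some second =>
        solutionGoA K (((l.erase first).erase second) ++ [first + 2 * second]) (answer + 1)
termination_by l.length
decreasing_by
  have hf : first ∈ l := PySem.List.min?_mem h
  have hs : second ∈ l.erase first := PySem.List.min?_mem h2
  have h1 := List.length_erase_of_mem hf
  have h2' := List.length_erase_of_mem hs
  have hpos : 0 < (l.erase first).length := List.length_pos_of_mem hs
  simp only [List.length_append, List.length_cons, List.length_nil, h2', h1]
  omega

def solution (scoville : List Int) (K : Int) : Int := solutionGoA K scoville 0

-- ===== PORT B =====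
-- the inner index loop of Source B (scan to the first position with scoville[i] >= v, insert there),
-- as structural recursion over the list
def insortB (v : Int) : List Int → List Int
  | [] => [v]
  | x :: xs => if x < v then x :: insortB v xs else v :: x :: xs

theorem length_insortB (v : Int) (xs : List Int) : (insortB v xs).length = xs.length + 1 := by
  induction xs with
  | nil => rfl
  | cons x xs ih => simp only [insortB]; split <;> simp [ih]

def solutionGoB (K : Int) : List Int → Int → Int
  | [], _ => -1
  | first :: rest, count =>
    if first ≥ K then count
    else
      match rest with
      | [] => -1
      | second :: rest2 => solutionGoB K (insortB (first + 2 * second) rest2) (count + 1)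
termination_by l _ => l.length
decreasing_by simp [length_insortB]

def solution_alt (scoville : List Int) (K : Int) : Int :=
  solutionGoB K (PySem.List.sorted scoville (fun x => x) false) 0

-- ===== PRECONDITION & SPEC =====
def Spec_solution (scoville : List Int) (K : Int) (out : Int) : Prop := out = solution_alt scoville K
instance (scoville : List Int) (K : Int) (out : Int) : Decidable (Spec_solution scoville K out) := by unfold Spec_solution; infer_instance

-- ===== CLAIM (what is proved, stated in full; the proofs are below) =====
def Claim_equal_solution : Prop := ∀ (scoville : List Int) (K : Int), Dom_solution scoville K → Spec_solution scoville K (solution scoville K)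

-- ===== LEMMAS AND PROOFS =====

theorem mem_insortB {v y : Int} {xs : List Int} : y ∈ insortB v xs ↔ y = v ∨ y ∈ xs := by
  induction xs with
  | nil => simp [insortB]
  | cons x xs ih => simp only [insortB]; split <;> simp [ih] <;> try tauto

theorem perm_insortB (v : Int) (xs : List Int) : (insortB v xs).Perm (v :: xs) := by
  induction xs with
  | nil => simp [insortB]
  | cons x xs ih =>
    simp only [insortB]; split
    · exact ((ih.cons x).trans (List.Perm.swap v x xs))
    · exact List.Perm.refl _

theorem pairwise_insortB {v : Int} {xs : List Int} (h : xs.Pairwise (· ≤ ·)) :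
    (insortB v xs).Pairwise (· ≤ ·) := by
  induction xs with
  | nil => simp [insortB]
  | cons x xs ih =>
    rcases List.pairwise_cons.1 h with ⟨hx, hxs⟩
    simp only [insortB]; split
    · rename_i hlt
      refine List.pairwise_cons.2 ⟨?_, ih hxs⟩
      intro y hy
      rcases mem_insortB.1 hy with rfl | hy
      · exact le_of_lt hlt
      · exact hx y hy
    · rename_i hge
      refine List.pairwise_cons.2 ⟨?_, h⟩
      intro y hy
      rcases List.mem_cons.1 hy with rfl | hy
      · omega
      · exact le_trans (by omega) (hx y hy)

-- the minimum A pops equals the head of B's sorted list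
theorem min?_of_sorted_perm {l l' t : List Int} {a : Int}
    (hp : l'.Perm l) (hs : l'.Pairwise (· ≤ ·)) (he : l' = a :: t) :
    PySem.List.min? l (fun x => x) = some a := by
  subst he
  have ha : a ∈ l := hp.mem_iff.1 (List.mem_cons_self)
  cases h : PySem.List.min? l (fun x => x) with
  | none =>
    have hnil : l = [] := (PySem.List.min?_eq_none_iff l (fun x => x)).1 h
    exact absurd (hnil ▸ ha) (by simp)
  | some m =>
    have hm : m ∈ l := PySem.List.min?_mem h
    have hmin := PySem.List.min?_isMin h
    have hma : m ≤ a := hmin a ha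
    have ham : a ≤ m := by
      rcases List.mem_cons.1 (hp.mem_iff.2 hm) with rfl | hmt
      · exact le_refl _
      · exact (List.pairwise_cons.1 hs).1 m hmt
    exact congrArg some (le_antisymm hma ham)

theorem min?_nil_int : PySem.List.min? ([] : List Int) (fun x => x) = none :=
  (PySem.List.min?_eq_none_iff [] (fun x => x)).2 rfl

theorem goA_nil (K ans : Int) : solutionGoA K [] ans = -1 := by
  rw [solutionGoA.eq_def]
  split
  · rfl
  · rename_i first h
    rw [min?_nil_int] at h
    cases h

theorem go_eq (K : Int) : ∀ n (l l' : List Int) (ans : Int), l.length ≤ n →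
    l'.Perm l → l'.Pairwise (· ≤ ·) → solutionGoA K l ans = solutionGoB K l' ans := by
  intro n
  induction n with
  | zero =>
    intro l l' ans hn hp _
    have : l = [] := List.eq_nil_of_length_eq_zero (by omega)
    subst this
    have : l' = [] := hp.eq_nil
    subst this
    rw [goA_nil, solutionGoB]
  | succ n ih =>
    intro l l' ans hn hp hs
    cases he : l' with
    | nil =>
      subst he
      have : l = [] := hp.symm.eq_nil
      subst this
      rw [goA_nil, solutionGoB]
    | cons a t =>
      have hmin := min?_of_sorted_perm hp hs he
      subst he
      have hperm_t : t.Perm (l.erase a) := by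
        have := hp.erase a
        rwa [List.erase_cons_head] at this
      have hst : t.Pairwise (· ≤ ·) := (List.pairwise_cons.1 hs).2
      rw [solutionGoA.eq_def, solutionGoB.eq_def]
      split
      · rename_i h
        rw [hmin] at h
        cases h
      · rename_i first h
        rw [hmin] at h
        injection h with h
        subst h
        by_cases hK : a ≥ K
        · simp [hK]
        · simp only [if_neg hK]
          split
          · rename_i h2
            have hnil : l.erase a = [] := (PySem.List.min?_eq_none_iff _ _).1 h2
            have htn : t = [] := (hnil ▸ hperm_t).eq_nil
            subst htn
            rfl
          · rename_i second h2
            cases ht : t with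
            | nil =>
              subst ht
              have hnil : l.erase a = [] := hperm_t.symm.eq_nil
              rw [hnil, min?_nil_int] at h2
              cases h2
            | cons b u =>
              subst ht
              have hmin2 := min?_of_sorted_perm hperm_t hst rfl
              rw [hmin2] at h2
              injection h2 with h2
              subst h2
              show _ = solutionGoB K (insortB (a + 2 * b) u) (ans + 1)
              apply ih
              · -- length of the next A-state
                have ha : a ∈ l := hp.mem_iff.1 (List.mem_cons_self)
                have hb : b ∈ l.erase a := hperm_t.mem_iff.1 (List.mem_cons_self)
                have h1 := List.length_erase_of_mem ha
                have h2 := List.length_erase_of_mem hb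
                have hpos : 0 < (l.erase a).length := List.length_pos_of_mem hb
                simp only [List.length_append, List.length_cons, List.length_nil, h2, h1]
                omega
              · -- next B-state is a permutation of next A-state
                have hu : u.Perm ((l.erase a).erase b) := by
                  have := hperm_t.erase b
                  rwa [List.erase_cons_head] at this
                exact ((perm_insortB _ _).trans
                  (List.perm_append_singleton _ _).symm).trans (hu.append_right [a + 2 * b])
              · exact pairwise_insortB (List.pairwise_cons.1 hst).2

-- ===== VERDICT (by name: the statement is the Claim_ definition above) =====
theorem solution_spec : Claim_equal_solution := by
  intro scoville K _
  unfold Spec_solution solution solution_alt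
  exact go_eq K scoville.length scoville _ 0 le_rfl
    (PySem.List.sorted_perm scoville (fun x => x) false)
    (PySem.List.sorted_pairwise scoville (fun x => x))
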